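-- pv_equiv track=rewrite | github.com/uclnlp/jack | jack/util/preprocessing.py | unique_words_with_chars
-- ===== SOURCE A (Python) =====
-- def unique_words_with_chars(tokens, char_vocab, char_limit=20):
--     vocab = dict()
--     rev_vocab = list()
--     unique_words = list()
--     unique_word_lengths = list()
--     token2unique = list()
--
--     for j in range(len(tokens)):
--         t2u = list()
--         for w in tokens[j]:
--             if w not in vocab:
--                 unique_word_lengths.append(min(char_limit, len(w)))
--                 unique_words.append([char_vocab.get(c, 0) for c in w[:char_limit]])
--                 vocab[w] = len(vocab)
--                 rev_vocab.append(w)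
--             t2u.append(vocab[w])
--         token2unique.append(t2u)
--
--     return unique_words, unique_word_lengths, token2unique, vocab, rev_vocab
-- ===== SOURCE B (Python) =====
-- def unique_words_with_chars(tokens, char_vocab, char_limit=20):
--     # Pass 1: build the vocabulary tables only (no token2unique yet).
--     vocab = dict()
--     rev_vocab = list()
--     unique_words = list()
--     unique_word_lengths = list()
--     for toks in tokens:
--         for w in toks:
--             if w not in vocab:
--                 vocab[w] = len(vocab)
--                 rev_vocab.append(w)
--                 unique_words.append([char_vocab.get(c, 0) for c in w[:char_limit]])
--                 unique_word_lengths.append(min(char_limit, len(w)))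
--     # Pass 2: pure lookup pass over the finished vocabulary.
--     token2unique = [[vocab[w] for w in toks] for toks in tokens]
--     return unique_words, unique_word_lengths, token2unique, vocab, rev_vocab
-- ===== Notes on version B (the rewrite author's own statement) =====
-- stated objective: alternative
-- what changed: A builds token2unique fused into the vocabulary-construction loop; B first builds the vocabulary tables in one pass and then produces token2unique in a second, pure lookup pass over the tokens.
import Mathlib
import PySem

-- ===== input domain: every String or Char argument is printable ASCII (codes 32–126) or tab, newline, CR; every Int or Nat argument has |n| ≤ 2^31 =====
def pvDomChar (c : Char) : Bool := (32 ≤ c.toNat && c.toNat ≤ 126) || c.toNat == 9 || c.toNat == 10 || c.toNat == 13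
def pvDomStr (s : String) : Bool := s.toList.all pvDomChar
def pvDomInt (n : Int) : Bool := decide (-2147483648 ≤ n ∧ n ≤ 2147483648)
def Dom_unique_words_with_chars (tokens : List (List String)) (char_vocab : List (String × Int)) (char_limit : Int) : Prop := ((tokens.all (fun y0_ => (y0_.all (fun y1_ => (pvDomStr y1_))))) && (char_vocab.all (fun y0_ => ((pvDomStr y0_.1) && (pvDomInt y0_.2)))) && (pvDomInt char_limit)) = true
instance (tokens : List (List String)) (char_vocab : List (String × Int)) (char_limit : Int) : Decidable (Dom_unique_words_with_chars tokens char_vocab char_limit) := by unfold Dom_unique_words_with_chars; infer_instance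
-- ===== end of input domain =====

-- B separates A's fused loop into a vocabulary-building pass followed by a pure lookup pass; same results (alternative decomposition, not claimed faster).


-- ===== PORT A =====
-- [char_vocab.get(c, 0) for c in w[:char_limit]]
def pvEncA (cv : List (String × Int)) (limit : Int) (w : String) : List Int :=
  (PySem.List.slice w.toList none (some limit)).map (fun c => (cv.lookup (String.ofList [c])).getD 0)

-- body of A's inner loop over the words of one sentence; state (unique_words, unique_word_lengths, vocab, rev_vocab, t2u)
def pvStepA (cv : List (String × Int)) (limit : Int)
    (acc : List (List Int) × List Int × List (String × Int) × List String × List Int) (w : String) :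
    List (List Int) × List Int × List (String × Int) × List String × List Int :=
  match acc with
  | (uw, uwl, vocab, rev, t2u) =>
    if (vocab.lookup w).isSome then
      (uw, uwl, vocab, rev, t2u ++ [(vocab.lookup w).getD 0])
    else
      let vocab' := vocab ++ [(w, (vocab.length : Int))]
      (uw ++ [pvEncA cv limit w], uwl ++ [min limit (w.toList.length : Int)], vocab', rev ++ [w],
        t2u ++ [(vocab'.lookup w).getD 0])

-- body of A's outer loop; state (unique_words, unique_word_lengths, token2unique, vocab, rev_vocab)
def pvSentA (cv : List (String × Int)) (limit : Int)
    (st : List (List Int) × List Int × List (List Int) × List (String × Int) × List String)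
    (sent : List String) :
    List (List Int) × List Int × List (List Int) × List (String × Int) × List String :=
  match st with
  | (uw, uwl, t2u, vocab, rev) =>
    match sent.foldl (pvStepA cv limit) (uw, uwl, vocab, rev, []) with
    | (uw', uwl', vocab', rev', t2uj) => (uw', uwl', t2u ++ [t2uj], vocab', rev')

def unique_words_with_chars (tokens : List (List String)) (char_vocab : List (String × Int)) (char_limit : Int) : List (List Int) × List Int × List (List Int) × (List (String × Int)) × List String :=
  tokens.foldl (pvSentA char_vocab char_limit) ([], [], [], [], [])

-- ===== PORT B =====
-- [char_vocab.get(c, 0) for c in w[:char_limit]]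
def pvEncB (cv : List (String × Int)) (limit : Int) (w : String) : List Int :=
  (PySem.List.slice w.toList none (some limit)).map (fun c => (cv.lookup (String.ofList [c])).getD 0)

-- pass 1 step: register one word if unseen; state (vocab, rev_vocab, unique_words, unique_word_lengths)
def pvAddB (cv : List (String × Int)) (limit : Int)
    (acc : List (String × Int) × List String × List (List Int) × List Int) (w : String) :
    List (String × Int) × List String × List (List Int) × List Int :=
  match acc with
  | (vocab, rev, uw, uwl) =>
    if (vocab.lookup w).isSome then (vocab, rev, uw, uwl)
    else (vocab ++ [(w, (vocab.length : Int))], rev ++ [w], uw ++ [pvEncB cv limit w],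
          uwl ++ [min limit (w.toList.length : Int)])

def unique_words_with_chars_alt (tokens : List (List String)) (char_vocab : List (String × Int)) (char_limit : Int) : List (List Int) × List Int × List (List Int) × (List (String × Int)) × List String :=
  match tokens.foldl (fun acc sent => sent.foldl (pvAddB char_vocab char_limit) acc) ([], [], [], []) with
  | (vocab, rev, uw, uwl) =>
    (uw, uwl, tokens.map (fun sent => sent.map (fun w => (vocab.lookup w).getD 0)), vocab, rev)

-- ===== PRECONDITION & SPEC =====
def Spec_unique_words_with_chars (tokens : List (List String)) (char_vocab : List (String × Int)) (char_limit : Int) (out : List (List Int) × List Int × List (List Int) × (List (String × Int)) × List String) : Prop := out = unique_words_with_chars_alt tokens char_vocab char_limit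
instance (tokens : List (List String)) (char_vocab : List (String × Int)) (char_limit : Int) (out : List (List Int) × List Int × List (List Int) × (List (String × Int)) × List String) : Decidable (Spec_unique_words_with_chars tokens char_vocab char_limit out) := by unfold Spec_unique_words_with_chars; infer_instance

-- ===== CLAIM (what is proved, stated in full; the proofs are below) =====
def Claim_equal_unique_words_with_chars : Prop := ∀ (tokens : List (List String)) (char_vocab : List (String × Int)) (char_limit : Int), Dom_unique_words_with_chars tokens char_vocab char_limit → Spec_unique_words_with_chars tokens char_vocab char_limit (unique_words_with_chars tokens char_vocab char_limit)

-- ===== LEMMAS AND PROOFS =====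

-- first-match lookup is stable under appending entries on the right
theorem pv_lookup_append_some {α β : Type} [BEq α] (l e : List (α × β)) (a : α) (b : β)
    (h : l.lookup a = some b) : (l ++ e).lookup a = some b := by
  induction l with
  | nil => simp [List.lookup] at h
  | cons p t ih =>
    cases p with
    | mk k v =>
      rw [List.cons_append]
      by_cases hk : (a == k) = true
      · simp only [List.lookup, hk] at h ⊢; exact h
      · simp only [List.lookup, hk] at h ⊢; exact ih h

theorem pv_lookup_append_self {α β : Type} [BEq α] [LawfulBEq α] (l : List (α × β)) (a : α) (b : β)
    (h : l.lookup a = none) : (l ++ [(a, b)]).lookup a = some b := by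
  induction l with
  | nil => simp
  | cons p t ih =>
    cases p with
    | mk k v =>
      rw [List.cons_append]
      by_cases hk : (a == k) = true
      · simp only [List.lookup, hk] at h; simp at h
      · simp only [List.lookup, hk] at h ⊢; exact ih h

-- pass-1 step only appends to the vocabulary
theorem pvAddB_vocab_ext (cv : List (String × Int)) (limit : Int)
    (acc : List (String × Int) × List String × List (List Int) × List Int) (w : String) :
    ∃ e, (pvAddB cv limit acc w).1 = acc.1 ++ e := by
  obtain ⟨vocab, rev, uw, uwl⟩ := acc
  by_cases h : (vocab.lookup w).isSome
  · exact ⟨[], by simp [pvAddB, h]⟩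
  · exact ⟨[(w, (vocab.length : Int))], by simp [pvAddB, h]⟩

theorem pvAddB_fold_vocab_ext (cv : List (String × Int)) (limit : Int) (sent : List String) :
    ∀ acc, ∃ e, (sent.foldl (pvAddB cv limit) acc).1 = acc.1 ++ e := by
  induction sent with
  | nil => exact fun acc => ⟨[], by simp⟩
  | cons w ws ih =>
    intro acc
    obtain ⟨e1, h1⟩ := pvAddB_vocab_ext cv limit acc w
    obtain ⟨e2, h2⟩ := ih (pvAddB cv limit acc w)
    exact ⟨e1 ++ e2, by simp [List.foldl_cons, h2, h1]⟩

theorem pvAddB_outer_vocab_ext (cv : List (String × Int)) (limit : Int) (toks : List (List String)) :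
    ∀ acc, ∃ e, (toks.foldl (fun acc (sent : List String) => sent.foldl (pvAddB cv limit) acc) acc).1 = acc.1 ++ e := by
  induction toks with
  | nil => exact fun acc => ⟨[], by simp⟩
  | cons s rest ih =>
    intro acc
    obtain ⟨e1, h1⟩ := pvAddB_fold_vocab_ext cv limit s acc
    obtain ⟨e2, h2⟩ := ih (s.foldl (pvAddB cv limit) acc)
    exact ⟨e1 ++ e2, by simp [List.foldl_cons, h2, h1]⟩

-- a word once present keeps its index through pass 1
theorem pvAddB_fold_lookup_mono (cv : List (String × Int)) (limit : Int) (sent : List String)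
    (acc : List (String × Int) × List String × List (List Int) × List Int) (w : String) (b : Int)
    (h : acc.1.lookup w = some b) : ((sent.foldl (pvAddB cv limit) acc).1).lookup w = some b := by
  obtain ⟨e, he⟩ := pvAddB_fold_vocab_ext cv limit sent acc
  rw [he]; exact pv_lookup_append_some _ _ _ _ h

theorem pvAddB_outer_lookup_mono (cv : List (String × Int)) (limit : Int) (toks : List (List String))
    (acc : List (String × Int) × List String × List (List Int) × List Int) (w : String) (b : Int)
    (h : acc.1.lookup w = some b) :
    ((toks.foldl (fun acc (sent : List String) => sent.foldl (pvAddB cv limit) acc) acc).1).lookup w = some b := by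
  obtain ⟨e, he⟩ := pvAddB_outer_vocab_ext cv limit toks acc
  rw [he]; exact pv_lookup_append_some _ _ _ _ h

-- after pass 1 over a sentence, every word of the sentence is in the vocabulary
theorem pvAddB_fold_mem_some (cv : List (String × Int)) (limit : Int) (sent : List String) :
    ∀ acc w, w ∈ sent → (((sent.foldl (pvAddB cv limit) acc).1).lookup w).isSome := by
  induction sent with
  | nil => intro _ _ h; simp at h
  | cons a as ih =>
    intro acc w hw
    rw [List.foldl_cons]
    rcases List.mem_cons.mp hw with h | h
    · subst h
      obtain ⟨vocab, rev, uw, uwl⟩ := acc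
      by_cases hl : (vocab.lookup w).isSome
      · obtain ⟨b, hb⟩ := Option.isSome_iff_exists.mp hl
        have := pvAddB_fold_lookup_mono cv limit as (pvAddB cv limit (vocab, rev, uw, uwl) w) w b
          (by simp [pvAddB, hb])
        simp [this]
      · have hnone : vocab.lookup w = none := Option.not_isSome_iff_eq_none.mp hl
        have hself : ((pvAddB cv limit (vocab, rev, uw, uwl) w).1).lookup w = some (vocab.length : Int) := by
          simp [pvAddB, hl]
          exact pv_lookup_append_self vocab w _ hnone
        have := pvAddB_fold_lookup_mono cv limit as (pvAddB cv limit (vocab, rev, uw, uwl) w) w _ hself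
        simp [this]
    · exact ih _ w h

-- A's fused inner loop equals B's pass-1 fold followed by final-vocabulary lookups
theorem pv_inner_corr (cv : List (String × Int)) (limit : Int) (sent : List String) :
    ∀ uw uwl vocab rev t2u,
      sent.foldl (pvStepA cv limit) (uw, uwl, vocab, rev, t2u) =
        ((sent.foldl (pvAddB cv limit) (vocab, rev, uw, uwl)).2.2.1,
         (sent.foldl (pvAddB cv limit) (vocab, rev, uw, uwl)).2.2.2,
         (sent.foldl (pvAddB cv limit) (vocab, rev, uw, uwl)).1,
         (sent.foldl (pvAddB cv limit) (vocab, rev, uw, uwl)).2.1,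
         t2u ++ sent.map (fun w => (((sent.foldl (pvAddB cv limit) (vocab, rev, uw, uwl)).1).lookup w).getD 0)) := by
  induction sent with
  | nil => intro uw uwl vocab rev t2u; simp
  | cons w ws ih =>
    intro uw uwl vocab rev t2u
    rw [List.foldl_cons, List.foldl_cons]
    by_cases hl : (vocab.lookup w).isSome
    · obtain ⟨b, hb⟩ := Option.isSome_iff_exists.mp hl
      have hstepA : pvStepA cv limit (uw, uwl, vocab, rev, t2u) w = (uw, uwl, vocab, rev, t2u ++ [b]) := by
        simp [pvStepA, hb]
      have hstepB : pvAddB cv limit (vocab, rev, uw, uwl) w = (vocab, rev, uw, uwl) := by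
        simp [pvAddB, hl]
      rw [hstepA, hstepB, ih]
      have hfin : (((ws.foldl (pvAddB cv limit) (vocab, rev, uw, uwl)).1).lookup w) = some b :=
        pvAddB_fold_lookup_mono cv limit ws (vocab, rev, uw, uwl) w b hb
      simp [hfin]
    · have hnone : vocab.lookup w = none := Option.not_isSome_iff_eq_none.mp hl
      have hself : (vocab ++ [(w, (vocab.length : Int))]).lookup w = some (vocab.length : Int) :=
        pv_lookup_append_self vocab w _ hnone
      have hstepA : pvStepA cv limit (uw, uwl, vocab, rev, t2u) w =
          (uw ++ [pvEncA cv limit w], uwl ++ [min limit (w.toList.length : Int)],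
           vocab ++ [(w, (vocab.length : Int))], rev ++ [w], t2u ++ [(vocab.length : Int)]) := by
        simp [pvStepA, hl, hself]
      have hstepB : pvAddB cv limit (vocab, rev, uw, uwl) w =
          (vocab ++ [(w, (vocab.length : Int))], rev ++ [w], uw ++ [pvEncB cv limit w],
           uwl ++ [min limit (w.toList.length : Int)]) := by
        simp [pvAddB, hl]
      rw [hstepA, hstepB, ih]
      have hfin : (((ws.foldl (pvAddB cv limit)
          (vocab ++ [(w, (vocab.length : Int))], rev ++ [w], uw ++ [pvEncB cv limit w],
           uwl ++ [min limit (w.toList.length : Int)])).1).lookup w) = some (vocab.length : Int) :=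
        pvAddB_fold_lookup_mono cv limit ws _ w _ hself
      rw [show pvEncA cv limit w = pvEncB cv limit w from rfl]
      simp only [String.length_toList] at hfin
      simp [hfin]

-- A's outer loop equals B's full pass 1 followed by the pure lookup pass
theorem pv_outer_corr (cv : List (String × Int)) (limit : Int) (toks : List (List String)) :
    ∀ uw uwl t2u vocab rev,
      toks.foldl (pvSentA cv limit) (uw, uwl, t2u, vocab, rev) =
        ((toks.foldl (fun acc (sent : List String) => sent.foldl (pvAddB cv limit) acc) (vocab, rev, uw, uwl)).2.2.1,
         (toks.foldl (fun acc (sent : List String) => sent.foldl (pvAddB cv limit) acc) (vocab, rev, uw, uwl)).2.2.2,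
         t2u ++ toks.map (fun s => s.map (fun w =>
           (((toks.foldl (fun acc (sent : List String) => sent.foldl (pvAddB cv limit) acc) (vocab, rev, uw, uwl)).1).lookup w).getD 0)),
         (toks.foldl (fun acc (sent : List String) => sent.foldl (pvAddB cv limit) acc) (vocab, rev, uw, uwl)).1,
         (toks.foldl (fun acc (sent : List String) => sent.foldl (pvAddB cv limit) acc) (vocab, rev, uw, uwl)).2.1) := by
  induction toks with
  | nil => intro uw uwl t2u vocab rev; simp
  | cons s rest ih =>
    intro uw uwl t2u vocab rev
    rw [List.foldl_cons, List.foldl_cons]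
    have hsent : pvSentA cv limit (uw, uwl, t2u, vocab, rev) s =
        ((s.foldl (pvAddB cv limit) (vocab, rev, uw, uwl)).2.2.1,
         (s.foldl (pvAddB cv limit) (vocab, rev, uw, uwl)).2.2.2,
         t2u ++ [s.map (fun w => (((s.foldl (pvAddB cv limit) (vocab, rev, uw, uwl)).1).lookup w).getD 0)],
         (s.foldl (pvAddB cv limit) (vocab, rev, uw, uwl)).1,
         (s.foldl (pvAddB cv limit) (vocab, rev, uw, uwl)).2.1) := by
      simp only [pvSentA]
      rw [pv_inner_corr cv limit s uw uwl vocab rev []]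
      simp
    rw [hsent]
    rw [ih]
    have hmapeq : s.map (fun w => (((s.foldl (pvAddB cv limit) (vocab, rev, uw, uwl)).1).lookup w).getD 0)
        = s.map (fun w => (((rest.foldl (fun acc (sent : List String) => sent.foldl (pvAddB cv limit) acc)
            (s.foldl (pvAddB cv limit) (vocab, rev, uw, uwl))).1).lookup w).getD 0) := by
      apply List.map_congr_left
      intro w hw
      obtain ⟨b, hb⟩ := Option.isSome_iff_exists.mp (pvAddB_fold_mem_some cv limit s (vocab, rev, uw, uwl) w hw)
      rw [hb, pvAddB_outer_lookup_mono cv limit rest _ w b hb]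
    simp [hmapeq]

-- ===== VERDICT (by name: the statement is the Claim_ definition above) =====
theorem unique_words_with_chars_spec : Claim_equal_unique_words_with_chars := by
  intro tokens cv limit _
  unfold Spec_unique_words_with_chars unique_words_with_chars unique_words_with_chars_alt
  rw [pv_outer_corr cv limit tokens [] [] [] [] []]
  simp
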